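-- pv_equiv track=rewrite | github.com/pe-brian/pyRiskV | src/foo.py | binrepr
-- ===== SOURCE A (Python) =====
-- def binrepr(arr):
--     res   = ''
--     count = 0
--     for bit in arr:
--         if count == 8:
--             res  += ' '
--             count = 0
--         res  += ('1' if bit else '0')
--         count += 1
--     return res
-- ===== SOURCE B (Python) =====
-- def binrepr(arr):
--     # Pass 1: build the full digit string; pass 2: regroup it into 8-char slices joined by spaces.
--     s = ''.join('1' if bit else '0' for bit in arr)
--     parts = []
--     i = 0
--     while i < len(s):
--         parts.append(s[i:i+8])
--         i += 8
--     return ' '.join(parts)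
-- ===== Notes on version B (the rewrite author's own statement) =====
-- stated objective: alternative
-- what changed: B first builds the whole digit string in one join pass and then regroups it into 8-character blocks by index slicing, instead of A's single counter-driven loop that interleaves digit emission with space insertion and counter resets.
import Mathlib
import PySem

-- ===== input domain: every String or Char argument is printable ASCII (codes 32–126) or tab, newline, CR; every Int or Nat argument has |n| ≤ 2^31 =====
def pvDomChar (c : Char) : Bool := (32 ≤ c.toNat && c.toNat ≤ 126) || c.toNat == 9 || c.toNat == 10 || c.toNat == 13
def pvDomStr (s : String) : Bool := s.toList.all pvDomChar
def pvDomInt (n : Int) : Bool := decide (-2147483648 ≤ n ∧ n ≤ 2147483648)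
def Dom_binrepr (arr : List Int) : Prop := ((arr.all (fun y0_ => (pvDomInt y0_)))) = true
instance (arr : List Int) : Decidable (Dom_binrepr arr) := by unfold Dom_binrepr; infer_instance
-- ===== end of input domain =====

-- B builds the whole digit string first and then regroups it into 8-char slices joined by
-- spaces, instead of A's counter-driven loop interleaving digits and spaces (objective: alternative).

-- ===== PORT A =====
-- one loop step of A's for-loop: state is (res, count)
def binreprStep (st : String × Int) (bit : Int) : String × Int :=
  let st' := if st.2 == 8 then (st.1 ++ " ", (0 : Int)) else st
  (st'.1 ++ (if bit ≠ 0 then "1" else "0"), st'.2 + 1)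

def binrepr (arr : List Int) : String :=
  (arr.foldl binreprStep ("", 0)).1

-- ===== PORT B =====
-- B's while-loop: collect s[i:i+8] while i < len(s), stepping i by 8
def binreprChunks (s : List Char) (i : Nat) : List (List Char) :=
  if i < s.length then
    PySem.List.slice s (some (i : Int)) (some ((i : Int) + 8)) :: binreprChunks s (i + 8)
  else []
termination_by s.length - i

def binrepr_alt (arr : List Int) : String :=
  let s : List Char := arr.map (fun bit => if bit ≠ 0 then '1' else '0')
  PySem.Str.join " " ((binreprChunks s 0).map String.ofList)

-- ===== PRECONDITION & SPEC =====
def Spec_binrepr (arr : List Int) (out : String) : Prop := out = binrepr_alt arr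
instance (arr : List Int) (out : String) : Decidable (Spec_binrepr arr out) := by unfold Spec_binrepr; infer_instance

-- ===== CLAIM (what is proved, stated in full; the proofs are below) =====
def Claim_equal_binrepr : Prop := ∀ (arr : List Int), Dom_binrepr arr → Spec_binrepr arr (binrepr arr)

-- ===== LEMMAS AND PROOFS =====

def bitC (b : Int) : Char := if b ≠ 0 then '1' else '0'

-- proof-side grouping of a char list into blocks of 8
def chunksG (d : List Char) : List (List Char) :=
  if d = [] then [] else d.take 8 :: chunksG (d.drop 8)
termination_by d.length
decreasing_by
  have : d ≠ [] := by assumption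
  have : 0 < d.length := List.length_pos_iff.mpr this
  simp [List.length_drop]; omega

theorem ofList_append (a b : List Char) :
    String.ofList a ++ String.ofList b = String.ofList (a ++ b) := by
  apply String.toList_inj.mp; simp

theorem bitStr_eq (b : Int) :
    (if b ≠ 0 then "1" else "0") = String.ofList [bitC b] := by
  unfold bitC; split_ifs <;> rfl

theorem binreprStep_eq (res : String) (c : Int) (b : Int) :
    binreprStep (res, c) b =
      if c = 8 then (res ++ " " ++ (if b ≠ 0 then "1" else "0"), 1)
      else (res ++ (if b ≠ 0 then "1" else "0"), c + 1) := by
  unfold binreprStep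
  by_cases h : c = 8 <;> simp [h]

theorem foldl_prefix (l : List Int) (res : String) (c : Int) :
    List.foldl binreprStep (res, c) l =
      (res ++ (List.foldl binreprStep ("", c) l).1,
        (List.foldl binreprStep ("", c) l).2) := by
  induction l generalizing res c with
  | nil => simp
  | cons b t ih =>
    simp only [List.foldl_cons, binreprStep_eq]
    by_cases h : c = 8
    · simp only [h, if_true]
      rw [ih (res ++ " " ++ (if b ≠ 0 then "1" else "0")) 1,
          ih ("" ++ " " ++ (if b ≠ 0 then "1" else "0")) 1]
      simp [String.append_assoc]
    · simp only [h, if_false]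
      rw [ih (res ++ (if b ≠ 0 then "1" else "0")) (c + 1),
          ih ("" ++ (if b ≠ 0 then "1" else "0")) (c + 1)]
      simp [String.append_assoc]

theorem foldl_small (l : List Int) (res : String) (c : Int)
    (h8 : c + l.length ≤ 8) :
    List.foldl binreprStep (res, c) l =
      (res ++ String.ofList (l.map bitC), c + l.length) := by
  induction l generalizing res c with
  | nil => simp
  | cons b t ih =>
    have hc : c ≠ 8 := by simp at h8; omega
    simp only [List.foldl_cons, binreprStep_eq, hc, if_false]
    rw [ih (res ++ (if b ≠ 0 then "1" else "0")) (c + 1) (by simp at h8 ⊢; omega)]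
    rw [bitStr_eq, String.append_assoc, ofList_append]
    simp only [List.map_cons, List.singleton_append, List.length_cons, Prod.mk.injEq]
    exact ⟨trivial, by push_cast; ring⟩

theorem chunks_shift (s : List Char) (i : Nat) :
    binreprChunks s i = chunksG (s.drop i) := by
  rw [binreprChunks]
  by_cases h : i < s.length
  · have hne : s.drop i ≠ [] := by
      simp [List.drop_eq_nil_iff]; omega
    rw [chunksG, if_neg hne]
    have hsl : PySem.List.slice s (some (i : Int)) (some ((i : Int) + 8)) =
        (s.drop i).take 8 := by
      have := PySem.List.slice_natCast_add s i 8
      simpa using this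
    rw [if_pos h, hsl, chunks_shift s (i + 8)]
    first
    | rfl
    | (congr 1
       rw [List.drop_drop])
  · have hnil : s.drop i = [] := by
      simp [List.drop_eq_nil_iff]; omega
    rw [if_neg h, hnil]
    simp [chunksG]
termination_by s.length - i
decreasing_by omega

theorem key (arr : List Int) :
    (List.foldl binreprStep ("", 0) arr).1 =
      PySem.Str.join " " ((chunksG (arr.map bitC)).map String.ofList) := by
  by_cases hlen : arr.length ≤ 8
  · rw [foldl_small arr "" 0 (by simp; omega)]
    rcases eq_or_ne arr [] with rfl | hne
    · simp [chunksG]; rfl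
    · have hsne : arr.map bitC ≠ [] := by simpa using hne
      have hd8 : (arr.map bitC).drop 8 = [] := by
        simp [List.drop_eq_nil_iff]; omega
      rw [chunksG, if_neg hsne, hd8, chunksG, if_pos rfl]
      have ht8 : (arr.map bitC).take 8 = arr.map bitC :=
        List.take_of_length_le (by simpa using hlen)
      rw [ht8]
      apply String.toList_inj.mp
      simp [PySem.Str.toList_join, PySem.Chars.join_singleton]
  · replace hlen : 8 < arr.length := by omega
    obtain ⟨b, rest, hd⟩ : ∃ b rest, arr.drop 8 = b :: rest := by
      cases h : arr.drop 8 with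
      | nil => exfalso; rw [List.drop_eq_nil_iff] at h; omega
      | cons b rest => exact ⟨b, rest, rfl⟩
    have hrec := key (arr.drop 8)
    rw [hd] at hrec
    have hL : (List.foldl binreprStep ("", 0) arr).1
        = String.ofList ((arr.take 8).map bitC) ++ " " ++
          (List.foldl binreprStep ("", 0) (b :: rest)).1 := by
      conv_lhs => rw [← List.take_append_drop 8 arr, List.foldl_append]
      rw [foldl_small (arr.take 8) "" 0 (by simp)]
      rw [show ((0:Int) + ((arr.take 8).length : Int)) = 8 by simp; omega]
      rw [hd]
      simp only [List.foldl_cons, binreprStep_eq]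
      norm_num
      rw [foldl_prefix rest, foldl_prefix rest]
      simp [String.append_assoc]
      try rw [foldl_prefix rest (if b = 0 then "0" else "1") 1]
      try simp [String.append_assoc]
    rw [hL, hrec]
    have harrne : arr ≠ [] := fun h => by subst h; simp at hlen
    have hsne : arr.map bitC ≠ [] := by simpa using harrne
    have hmt : (arr.map bitC).take 8 = (arr.take 8).map bitC := by
      rw [List.map_take]
    have hmd : (arr.map bitC).drop 8 = (b :: rest).map bitC := by
      rw [← List.map_drop, hd]
    conv_rhs => rw [chunksG, if_neg hsne, hmt, hmd]
    have hunf : chunksG ((b :: rest).map bitC)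
        = ((b :: rest).map bitC).take 8 :: chunksG (((b :: rest).map bitC).drop 8) := by
      rw [chunksG, if_neg (by simp)]
    rw [hunf]
    apply String.toList_inj.mp
    simp only [String.toList_append, PySem.Str.toList_join, List.map_cons,
      PySem.Chars.join_cons_cons, String.toList_ofList]
    try simp [List.append_assoc]
termination_by arr.length
decreasing_by simp [List.length_drop]; omega

-- ===== VERDICT (by name: the statement is the Claim_ definition above) =====
theorem binrepr_spec : Claim_equal_binrepr := by
  intro arr _
  unfold Spec_binrepr binrepr binrepr_alt
  simp only []
  rw [chunks_shift, List.drop_zero]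
  have : arr.map (fun bit => if bit ≠ 0 then '1' else '0') = arr.map bitC := rfl
  rw [this, key]
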